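-- pv_equiv track=rewrite | github.com/wangha1/CS361 | wangha361assign1/kwic2.py | kwic
-- ===== SOURCE A (Python) =====
-- def kwic(str):
-- 	list1 = str.split("\n");
-- 	if(str == ""):
-- 		return [];
-- 	list2 = [];
-- 	for i in range(len(list1)):
-- 		line = [];
-- 		line.append(list1[i])
-- 		words = [];
-- 		words = line[0].split(" ");
-- 		if(len(words) > 1):
-- 			for x in range(len(words)):
-- 				temp = [];
-- 				if(x == len(words)):
-- 					y = -1;
-- 				else:
-- 					y = x
-- 				temp = shift(words,y);
-- 				list2.append((temp,i));
-- 		else: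
-- 			list2.append((words, i));
-- 	return list2;
--
-- def shift(l,i):
-- 	return l[i:] + l[:i]
-- ===== SOURCE B (Python) =====
-- def kwic(str):
--     if str == "":
--         return []
--     out = []
--     for i, line in enumerate(str.split("\n")):
--         words = line.split(" ")
--         if len(words) > 1:
--             rot = words
--             for _ in words:
--                 out.append((rot, i))
--                 rot = rot[1:] + rot[:1]
--         else:
--             out.append((words, i))
--     return out
-- ===== Notes on version B (the rewrite author's own statement) =====
-- stated objective: alternative
-- what changed: Replaces the per-position slice computation shift(words,x) (with its dead x==len branch) by a rotation state threaded through the inner loop (rot = rot[1:]+rot[:1] after each snapshot), and drives the outer loop by enumerate over the lines instead of indexing range(len(list1)).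
import Mathlib
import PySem

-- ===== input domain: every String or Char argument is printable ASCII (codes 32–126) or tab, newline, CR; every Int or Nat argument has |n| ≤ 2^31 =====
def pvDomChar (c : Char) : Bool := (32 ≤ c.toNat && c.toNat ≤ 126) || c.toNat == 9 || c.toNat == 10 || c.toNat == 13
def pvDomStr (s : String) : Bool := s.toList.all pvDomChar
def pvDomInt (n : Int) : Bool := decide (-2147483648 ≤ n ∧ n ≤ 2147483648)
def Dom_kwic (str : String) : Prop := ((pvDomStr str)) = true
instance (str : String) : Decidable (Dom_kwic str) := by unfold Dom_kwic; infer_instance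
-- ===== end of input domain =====

-- B threads a running rotation state through the inner loop (snapshot, then rotate left by one)
-- and enumerates the lines, instead of recomputing a slice-based shift at each index; alternative decomposition, same cost.

-- s.split(sep) for the nonempty literal separators used here: split? is always `some`
def pySplit (s sep : String) : List String := (PySem.Str.split? s sep).getD []

-- ===== PORT A =====
def shiftA (l : List String) (i : Int) : List String :=
  PySem.List.slice l (some i) none ++ PySem.List.slice l none (some i)

def kwic (str : String) : List (List String × Int) :=
  let list1 := pySplit str "\n"
  if str == "" then []
  else
    (PySem.List.pyRange 0 (list1.length : Int) 1).foldl
      (fun list2 i =>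
        let line := PySem.List.pyGetD list1 i ""
        let words := pySplit line " "
        if words.length > 1 then
          (PySem.List.pyRange 0 (words.length : Int) 1).foldl
            (fun acc x =>
              let y : Int := if x == (words.length : Int) then -1 else x
              let temp := shiftA words y
              acc ++ [(temp, i)]) list2
        else
          list2 ++ [(words, i)]) []

-- ===== PORT B =====
def kwic_alt (str : String) : List (List String × Int) :=
  if str == "" then []
  else
    (PySem.List.enumerate (pySplit str "\n") 0).foldl
      (fun out p =>
        let words := pySplit p.2 " "
        if words.length > 1 then
          (words.foldl
            (fun (st : List String × List (List String × Int)) _ =>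
              (PySem.List.slice st.1 (some 1) none ++ PySem.List.slice st.1 none (some 1),
               st.2 ++ [(st.1, p.1)]))
            (words, out)).2
        else
          out ++ [(words, p.1)]) []

-- ===== PRECONDITION & SPEC =====
def Spec_kwic (str : String) (out : List (List String × Int)) : Prop := out = kwic_alt str
instance (str : String) (out : List (List String × Int)) : Decidable (Spec_kwic str out) := by unfold Spec_kwic; infer_instance

-- ===== CLAIM (what is proved, stated in full; the proofs are below) =====
def Claim_equal_kwic : Prop := ∀ (str : String), Dom_kwic str → Spec_kwic str (kwic str)

-- ===== LEMMAS AND PROOFS =====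

-- canonical per-line contribution
def gLine (i : Int) (line : String) : List (List String × Int) :=
  if (pySplit line " ").length > 1 then
    (List.range (pySplit line " ").length).map (fun k => ((pySplit line " ").rotate k, i))
  else [(pySplit line " ", i)]

-- B's inner rotation loop, canonically
lemma rot_loop (i : Int) : ∀ (cnt : List String) (rot : List String) (out : List (List String × Int)),
    cnt.foldl
      (fun (st : List String × List (List String × Int)) _ =>
        (PySem.List.slice st.1 (some 1) none ++ PySem.List.slice st.1 none (some 1),
         st.2 ++ [(st.1, i)]))
      (rot, out)
    = (rot.rotate cnt.length,
       out ++ (List.range cnt.length).map (fun k => (rot.rotate k, i))) := by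
  intro cnt
  induction cnt with
  | nil => intro rot out; simp
  | cons x t ih =>
      intro rot out
      have hstep : PySem.List.slice rot (some 1) none ++ PySem.List.slice rot none (some 1)
          = rot.rotate 1 := by
        rw [PySem.List.slice_from_one]
        rw [show ((1 : Int) = ((1 : Nat) : Int)) from rfl, PySem.List.slice_to_natCast]
        cases rot <;> simp [List.rotate_cons_succ]
      simp only [List.foldl_cons, hstep, ih, List.length_cons]
      rw [List.rotate_rotate, List.range_succ_eq_map]
      simp [List.rotate_rotate, Nat.add_comm, List.append_assoc]

-- A's inner loop, canonically
lemma innerA (ws : List String) (i : Int) (acc : List (List String × Int)) :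
    (PySem.List.pyRange 0 (ws.length : Int) 1).foldl
      (fun acc2 x =>
        acc2 ++ [(shiftA ws (if x == (ws.length : Int) then -1 else x), i)]) acc
    = acc ++ (List.range ws.length).map (fun k => (ws.rotate k, i)) := by
  have hcong := PySem.List.foldl_congr_mem'
      (PySem.List.pyRange 0 (ws.length : Int) 1)
      (fun acc2 x => acc2 ++ [(shiftA ws (if x == (ws.length : Int) then -1 else x), i)])
      (fun acc2 x => acc2 ++ [(shiftA ws x, i)]) acc
      (by
        intro x hx acc2
        have hlt : x < (ws.length : Int) := ((PySem.List.mem_pyRange_one).1 hx).2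
        have hne : (x == (ws.length : Int)) = false := by
          simp only [beq_eq_false_iff_ne]; omega
        simp [hne])
  rw [hcong, PySem.List.foldl_append_singleton_eq_map, PySem.List.pyRange_one]
  simp only [List.map_map]
  congr 1
  apply List.map_congr_left
  intro k hk
  have hk' : k < ws.length := by
    have := List.mem_range.1 hk; omega
  simp only [Function.comp, zero_add, Int.sub_zero, Int.toNat_natCast] at *
  congr 1
  unfold shiftA
  rw [PySem.List.slice_from_natCast, PySem.List.slice_to_natCast,
      List.rotate_eq_drop_append_take (by omega)]

-- bridge: A's index-driven outer loop = an enumerate-driven loop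
lemma outer_bridge (g : Int → String → List (List String × Int)) :
    ∀ (l pre : List String) (acc : List (List String × Int)),
      (PySem.List.pyRange (pre.length : Int) ((pre.length : Int) + (l.length : Int)) 1).foldl
        (fun acc i => acc ++ g i (PySem.List.pyGetD (pre ++ l) i "")) acc
      = (PySem.List.enumerate l (pre.length : Int)).foldl
          (fun acc p => acc ++ g p.1 p.2) acc := by
  intro l
  induction l with
  | nil => intro pre acc; simp [PySem.List.pyRange_one_eq_nil, PySem.List.enumerate]
  | cons x t ih =>
      intro pre acc
      rw [PySem.List.pyRange_one_cons (by simp only [List.length_cons]; push_cast; omega)]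
      rw [PySem.List.enumerate_cons]
      simp only [List.foldl_cons]
      have hget : PySem.List.pyGetD (pre ++ x :: t) (pre.length : Int) "" = x := by
        rw [PySem.List.pyGetD_eq_getElem _ _ (by omega)
            (by simp only [List.length_append, List.length_cons]; push_cast; omega)]
        simp
      rw [hget]
      have h2 := ih (pre ++ [x]) (acc ++ g (pre.length : Int) x)
      simp only [List.length_append, List.length_cons, List.append_assoc,
        List.singleton_append, List.length_nil] at h2 ⊢
      push_cast at h2 ⊢
      convert h2 using 2
      ring_nf

-- A equals the canonical enumerate form
lemma A_canon (str : String) (h : (str == "") = false) :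
    kwic str = (PySem.List.enumerate (pySplit str "\n") 0).foldl
      (fun acc p => acc ++ gLine p.1 p.2) [] := by
  unfold kwic
  simp only [h, Bool.false_eq_true, if_false]
  have hbody := PySem.List.foldl_congr_mem'
      (PySem.List.pyRange 0 ((pySplit str "\n").length : Int) 1)
      (fun list2 i =>
        let line := PySem.List.pyGetD (pySplit str "\n") i ""
        let words := pySplit line " "
        if words.length > 1 then
          (PySem.List.pyRange 0 (words.length : Int) 1).foldl
            (fun acc x =>
              let y : Int := if x == (words.length : Int) then -1 else x
              let temp := shiftA words y
              acc ++ [(temp, i)]) list2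
        else
          list2 ++ [(words, i)])
      (fun list2 i => list2 ++ gLine i (PySem.List.pyGetD (pySplit str "\n") i ""))
      ([])
      (by
        intro i hi acc
        simp only [gLine]
        split_ifs with hw
        · exact innerA _ _ _
        · rfl)
  rw [hbody]
  have hb := outer_bridge (fun i line => gLine i line) (pySplit str "\n") [] []
  simp only [List.length_nil, List.nil_append, Nat.cast_zero, zero_add] at hb
  exact hb

-- B equals the canonical enumerate form
lemma B_canon (str : String) (h : (str == "") = false) :
    kwic_alt str = (PySem.List.enumerate (pySplit str "\n") 0).foldl
      (fun acc p => acc ++ gLine p.1 p.2) [] := by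
  unfold kwic_alt
  simp only [h, Bool.false_eq_true, if_false]
  apply PySem.List.foldl_congr_mem'
  intro p hp acc
  simp only [gLine]
  split_ifs with hw
  · rw [rot_loop]
  · rfl

-- ===== VERDICT (by name: the statement is the Claim_ definition above) =====
theorem kwic_spec : Claim_equal_kwic := by
  intro str _
  unfold Spec_kwic
  by_cases h : str == ""
  · unfold kwic kwic_alt; simp [h]
  · rw [A_canon str (by simpa using h), B_canon str (by simpa using h)]
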